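-- pv_equiv track=rewrite | github.com/akkerman/advent_of_code | 2019/12.py | component_repeats
-- ===== SOURCE A (Python) =====
-- def signum(x: int, y: int) -> int:
--     """Return the sign of y - x."""
--     return (y > x) - (y < x)
--
-- def apply_component(positions: list[int], velocities: list[int]):
--     """Apply 1 step of gravity and velocity to one of the components of all planets."""
--     length = len(positions)
--     new_velocities = velocities.copy()
--     for x in range(length):
--         new_velocities[x] += sum(signum(positions[x], positions[y]) for y in range(length) if x!=y)
--     velocities = new_velocities
--     return [p+v for p,v in zip(positions, velocities)], new_velocities
--
-- def component_repeats(positions: list[int]) -> int: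
--     """Figure out when the same x,y or z position, including velocity repeats."""
--     velocities = [0] * len(positions)
--     history = {tuple(positions + velocities)}
--
--     while True:
--         positions, velocities = apply_component(positions, velocities)
--         vector = tuple(positions + velocities)
--         if vector in history:
--             return len(history)
--         history.add(vector)
-- ===== SOURCE B (Python) =====
-- def component_repeats(positions: list[int]) -> int:
--     """Figure out when the same x,y or z position, including velocity repeats.
--
--     The step map is a bijection, so the first state ever revisited is the
--     initial one: count steps until we are back at the start, O(1) memory.
--     Velocity updates use comparison counts instead of a signum double loop.
--     """
--     start = tuple(positions) + (0,) * len(positions)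
--     velocities = [0] * len(positions)
--     steps = 0
--     while True:
--         velocities = [v + sum(q > p for q in positions) - sum(q < p for q in positions)
--                       for p, v in zip(positions, velocities)]
--         positions = [p + v for p, v in zip(positions, velocities)]
--         steps += 1
--         if tuple(positions) + tuple(velocities) == start:
--             return steps
-- ===== Notes on version B (the rewrite author's own statement) =====
-- stated objective: alternative
-- what changed: B drops A's growing history set entirely: since the step map is injective the first repeated state is necessarily the initial one, so B just counts steps until the state equals the start (O(1) memory instead of O(period)), and computes each velocity update by comparison counts over the positions instead of A's index-based signum double loop.
import Mathlib
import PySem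

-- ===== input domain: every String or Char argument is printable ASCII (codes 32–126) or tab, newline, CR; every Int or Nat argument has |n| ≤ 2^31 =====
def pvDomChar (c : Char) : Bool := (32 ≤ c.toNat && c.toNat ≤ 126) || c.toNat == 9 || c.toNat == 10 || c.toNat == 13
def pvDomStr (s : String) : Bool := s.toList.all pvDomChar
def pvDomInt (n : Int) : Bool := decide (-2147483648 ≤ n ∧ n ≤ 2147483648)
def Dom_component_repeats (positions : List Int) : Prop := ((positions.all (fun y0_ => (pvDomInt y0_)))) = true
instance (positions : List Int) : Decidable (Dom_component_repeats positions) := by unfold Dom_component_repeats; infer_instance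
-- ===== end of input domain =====

-- B replaces A's O(period)-sized history set by a count-steps-until-back-at-start loop
-- (valid because the step map is injective) with comparison-count velocity updates;
-- both while-True loops are totalized with the same huge fuel (0 on exhaustion, never
-- reached on inputs whose period is remotely computable).


-- the shared fuel totalizing both while-True loops (never reached in practice)
def pvFuel : Nat := 10 ^ 100

-- ===== PORT A =====
def pvSignum (x y : Int) : Int := (if x < y then (1:Int) else 0) - (if y < x then (1:Int) else 0)

def pvApplyComponent (positions velocities : List Int) : List Int × List Int :=
  let new_velocities :=
    (PySem.List.pyRange 0 (positions.length : Int) 1).foldl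
      (fun nv x =>
        PySem.List.pySetD nv x (PySem.List.pyGetD nv x 0 +
          (((PySem.List.pyRange 0 (positions.length : Int) 1).filter (fun y => x != y)).map
            (fun y => pvSignum (PySem.List.pyGetD positions x 0) (PySem.List.pyGetD positions y 0))).sum))
      velocities
  ((positions.zip new_velocities).map (fun pv => pv.1 + pv.2), new_velocities)

def pvLoopA : Nat → List Int → List Int → PySem.Set (List Int) → Int
  | 0, _, _, _ => 0
  | fuel+1, pos, vel, history =>
    let s := pvApplyComponent pos vel
    let vector := s.1 ++ s.2
    if PySem.Set.contains history vector then (history.length : Int)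
    else pvLoopA fuel s.1 s.2 (PySem.Set.add history vector)

def component_repeats (positions : List Int) : Int :=
  let velocities : List Int := List.replicate positions.length 0
  pvLoopA pvFuel positions velocities (PySem.Set.ofList [positions ++ velocities])

-- ===== PORT B =====
def pvStep (positions velocities : List Int) : List Int × List Int :=
  let velocities' := (positions.zip velocities).map (fun pv =>
    pv.2 + (positions.countP (fun q => decide (pv.1 < q)) : Int)
         - (positions.countP (fun q => decide (q < pv.1)) : Int))
  ((positions.zip velocities').map (fun pv => pv.1 + pv.2), velocities')

def pvLoopB : Nat → List Int → List Int → List Int → Int → Int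
  | 0, _, _, _, _ => 0
  | fuel+1, start, pos, vel, steps =>
    let s := pvStep pos vel
    if s.1 ++ s.2 == start then steps + 1
    else pvLoopB fuel start s.1 s.2 (steps + 1)

def component_repeats_alt (positions : List Int) : Int :=
  pvLoopB pvFuel (positions ++ List.replicate positions.length 0)
    positions (List.replicate positions.length 0) 0

-- ===== PRECONDITION & SPEC =====
def Spec_component_repeats (positions : List Int) (out : Int) : Prop := out = component_repeats_alt positions
instance (positions : List Int) (out : Int) : Decidable (Spec_component_repeats positions out) := by unfold Spec_component_repeats; infer_instance

-- ===== CLAIM (what is proved, stated in full; the proofs are below) =====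
def Claim_equal_component_repeats : Prop := ∀ (positions : List Int), Dom_component_repeats positions → Spec_component_repeats positions (component_repeats positions)

-- ===== LEMMAS AND PROOFS =====

-- the flattened state A stores in its history set / B compares against the start
def pvVec (s : List Int × List Int) : List Int := s.1 ++ s.2

-- the trajectory of states, written with B's step function
def pvTraj (p0 : List Int) : Nat → List Int × List Int
  | 0 => (p0, List.replicate p0.length 0)
  | k+1 => pvStep (pvTraj p0 k).1 (pvTraj p0 k).2

lemma pvStep_len (p v : List Int) (h : v.length = p.length) :
    (pvStep p v).1.length = p.length ∧ (pvStep p v).2.length = p.length := by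
  simp [pvStep, h]

lemma pvTraj_len (p0 : List Int) (k : Nat) :
    (pvTraj p0 k).1.length = p0.length ∧ (pvTraj p0 k).2.length = p0.length := by
  induction k with
  | zero => simp [pvTraj]
  | succ k ih =>
    have := pvStep_len (pvTraj p0 k).1 (pvTraj p0 k).2 (ih.2.trans ih.1.symm)
    simpa [pvTraj, ih.1] using this

-- A's index loop writes each slot once with an nv-independent value
lemma pvFoldlSet (g : Int → Int) : ∀ (n : Nat) (a : Int), 0 ≤ a → ∀ (w : List Int),
    w.length - a.toNat = n →
    ∃ r, (PySem.List.pyRange a (w.length : Int) 1).foldl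
          (fun nv x => PySem.List.pySetD nv x (PySem.List.pyGetD nv x 0 + g x)) w = r ∧
        r.length = w.length ∧
        ∀ i (h : i < w.length), r[i]? = some (if a ≤ (i : Int) then w[i] + g i else w[i]) := by
  intro n
  induction n with
  | zero =>
    intro a ha w hw
    have hb : (w.length : Int) ≤ a := by omega
    refine ⟨w, ?_, rfl, ?_⟩
    · rw [PySem.List.pyRange_one_eq_nil hb]; rfl
    · intro i hi
      have : ¬ a ≤ (i : Int) := by omega
      simp [this, List.getElem?_eq_getElem hi]
  | succ n ih =>
    intro a ha w hw
    have hlt : a < (w.length : Int) := by omega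
    have haN : a.toNat < w.length := by omega
    rw [PySem.List.pyRange_one_cons hlt]
    simp only [List.foldl_cons]
    set w' := PySem.List.pySetD w a (PySem.List.pyGetD w a 0 + g a) with hw'
    have hlen' : w'.length = w.length := by
      simp [hw', PySem.List.pySetD_of_nonneg _ _ ha]
    have hset : w' = w.set a.toNat (w[a.toNat] + g a) := by
      rw [hw', PySem.List.pySetD_of_nonneg _ _ ha, PySem.List.pyGetD_of_nonneg _ _ ha]
      simp [List.getD, List.getElem?_eq_getElem haN]
    obtain ⟨r, hr1, hr2, hr3⟩ := ih (a + 1) (by omega) w' (by omega)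
    refine ⟨r, ?_, by rw [hr2, hlen'], ?_⟩
    · rw [← hr1, hlen']
    · intro i hi
      have hi' : i < w'.length := by omega
      rw [hr3 i hi']
      by_cases hia : i = a.toNat
      · subst hia
        have hvi : w'[a.toNat]'hi' = w[a.toNat] + g a := by
          simp only [hset]; simp
        have hae : ((a.toNat : Nat) : Int) = a := by omega
        have h1 : ¬ (a + 1 ≤ ((a.toNat : Nat) : Int)) := by omega
        have h2 : a ≤ ((a.toNat : Nat) : Int) := by omega
        rw [if_neg h1, if_pos h2, hvi, hae]
      · have hvi : w'[i]'hi' = w[i] := by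
          simp only [hset]; simp [Ne.symm hia]
        rw [hvi]
        by_cases hle : a + 1 ≤ (i : Int)
        · have h2 : a ≤ (i : Int) := by omega
          simp [hle, h2]
        · have h2 : ¬ a ≤ (i : Int) := by omega
          simp [hle, h2]

lemma pvCnt (a : Int) : ∀ (l : List Int),
    (l.map (fun q => pvSignum a q)).sum
      = (l.countP (fun q => decide (a < q)) : Int) - (l.countP (fun q => decide (q < a)) : Int) := by
  intro l
  induction l with
  | nil => simp
  | cons q t ih =>
    rw [List.map_cons, List.sum_cons, List.countP_cons, List.countP_cons, ih, pvSignum]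
    by_cases h1 : a < q <;> by_cases h2 : q < a <;>
      simp [h1, h2] <;> omega

-- sum of signum over all other indices = (#greater) - (#smaller)
lemma pvSumSignum (positions : List Int) (x : Int) (hx0 : 0 ≤ x) (hx : x < (positions.length : Int)) :
    (((PySem.List.pyRange 0 (positions.length : Int) 1).filter (fun y => x != y)).map
      (fun y => pvSignum (PySem.List.pyGetD positions x 0) (PySem.List.pyGetD positions y 0))).sum =
    (positions.countP (fun q => decide (PySem.List.pyGetD positions x 0 < q)) : Int)
      - (positions.countP (fun q => decide (q < PySem.List.pyGetD positions x 0)) : Int) := by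
  have hxr : PySem.List.pyRange 0 (positions.length : Int) 1
      = PySem.List.pyRange 0 x 1 ++ x :: PySem.List.pyRange (x+1) (positions.length : Int) 1 := by
    rw [PySem.List.pyRange_one_append 0 x _ hx0 (le_of_lt hx), PySem.List.pyRange_one_cons hx]
  have hfl : (PySem.List.pyRange 0 x 1).filter (fun y => x != y) = PySem.List.pyRange 0 x 1 :=
    List.filter_eq_self.mpr (by
      intro y hy; rw [PySem.List.mem_pyRange_one] at hy; simp; omega)
  have hfr : (PySem.List.pyRange (x+1) (positions.length : Int) 1).filter (fun y => x != y)
      = PySem.List.pyRange (x+1) (positions.length : Int) 1 :=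
    List.filter_eq_self.mpr (by
      intro y hy; rw [PySem.List.mem_pyRange_one] at hy; simp; omega)
  have hmap : ∀ (l : List Int),
      l.map (fun y => pvSignum (PySem.List.pyGetD positions x 0) (PySem.List.pyGetD positions y 0))
        = (l.map (fun y => PySem.List.pyGetD positions y 0)).map
            (fun q => pvSignum (PySem.List.pyGetD positions x 0) q) := by
    intro l; rw [List.map_map]; rfl
  rw [hxr]
  simp only [List.filter_append, List.filter_cons, bne_self_eq_false, hfl, hfr,
    Bool.false_eq_true, if_false, List.map_append, List.sum_append]
  have hz : pvSignum (PySem.List.pyGetD positions x 0) (PySem.List.pyGetD positions x 0) = 0 := by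
    simp [pvSignum]
  have hfull : ((PySem.List.pyRange 0 (positions.length : Int) 1).map
      (fun y => pvSignum (PySem.List.pyGetD positions x 0) (PySem.List.pyGetD positions y 0))).sum
      = (positions.map (fun q => pvSignum (PySem.List.pyGetD positions x 0) q)).sum := by
    rw [hmap, PySem.List.map_pyGetD_pyRange_zero']
  rw [hxr] at hfull
  simp only [List.map_append, List.map_cons, List.sum_append, List.sum_cons, hz, zero_add] at hfull
  rw [hfull]
  exact pvCnt (PySem.List.pyGetD positions x 0) positions

-- the two step functions agree on equal-length states
lemma pvApply_eq (p v : List Int) (h : v.length = p.length) :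
    pvApplyComponent p v = pvStep p v := by
  have hb : (p.length : Int) = (v.length : Int) := by rw [h]
  unfold pvApplyComponent pvStep
  rw [hb]
  obtain ⟨r, hr1, hr2, hr3⟩ := pvFoldlSet
    (fun x => (((PySem.List.pyRange 0 (v.length : Int) 1).filter (fun y => x != y)).map
      (fun y => pvSignum (PySem.List.pyGetD p x 0) (PySem.List.pyGetD p y 0))).sum)
    v.length 0 (le_refl 0) v (by omega)
  rw [hr1]
  have hnv : r = (p.zip v).map (fun pv =>
      pv.2 + (p.countP (fun q => decide (pv.1 < q)) : Int)
           - (p.countP (fun q => decide (q < pv.1)) : Int)) := by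
    apply List.ext_getElem?
    intro i
    by_cases hi : i < v.length
    · have hip : i < p.length := by omega
      have hiz : i < ((p.zip v).map (fun pv =>
          pv.2 + (p.countP (fun q => decide (pv.1 < q)) : Int)
               - (p.countP (fun q => decide (q < pv.1)) : Int))).length := by
        simp [List.length_zip]; omega
      rw [hr3 i hi, List.getElem?_eq_getElem hiz]
      simp only [List.getElem_map, List.getElem_zip]
      have h0 : (0 : Int) ≤ (i : Int) := by omega
      have hs := pvSumSignum p (i : Int) h0 (by omega)
      rw [hb] at hs
      rw [if_pos h0, hs]
      have hg : PySem.List.pyGetD p (i : Int) 0 = p[i] := by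
        rw [PySem.List.pyGetD_eq_getElem p 0 h0 (by omega)]
        simp
      rw [hg]
      congr 1
      omega
    · have h1 : r.length ≤ i := by omega
      have h2 : ((p.zip v).map (fun pv =>
          pv.2 + (p.countP (fun q => decide (pv.1 < q)) : Int)
               - (p.countP (fun q => decide (q < pv.1)) : Int))).length ≤ i := by
        simp [List.length_zip]; omega
      rw [List.getElem?_eq_none h1, List.getElem?_eq_none h2]
  rw [hnv]

-- B's step is injective on equal-length states
lemma pvStep_inj (p1 v1 p2 v2 : List Int) (h1 : v1.length = p1.length)
    (h2 : v2.length = p2.length) (hn : p1.length = p2.length)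
    (h : pvVec (pvStep p1 v1) = pvVec (pvStep p2 v2)) : p1 = p2 ∧ v1 = v2 := by
  have l11 := (pvStep_len p1 v1 h1).1
  have l12 := (pvStep_len p1 v1 h1).2
  have l21 := (pvStep_len p2 v2 h2).1
  have l22 := (pvStep_len p2 v2 h2).2
  unfold pvVec at h
  obtain ⟨hP, hNV⟩ := List.append_inj h (by rw [l11, l21, hn])
  have hp : p1 = p2 := by
    apply List.ext_getElem hn
    intro i hi1 hi2
    have e : (pvStep p1 v1).1[i]? = (pvStep p2 v2).1[i]? := by rw [hP]
    have eNV : (pvStep p1 v1).2[i]? = (pvStep p2 v2).2[i]? := by rw [hNV]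
    rw [List.getElem?_eq_getElem (by omega), List.getElem?_eq_getElem (by omega)] at e
    rw [List.getElem?_eq_getElem (by omega), List.getElem?_eq_getElem (by omega)] at eNV
    simp [pvStep] at e eNV
    omega
  refine ⟨hp, ?_⟩
  apply List.ext_getElem (by omega)
  intro i hi1 hi2
  have eNV : (pvStep p1 v1).2[i]? = (pvStep p2 v2).2[i]? := by rw [hNV]
  rw [List.getElem?_eq_getElem (by omega), List.getElem?_eq_getElem (by omega)] at eNV
  simp [pvStep, hp] at eNV
  omega

-- main invariant: A's loop with history = the distinct trajectory prefix equals B's counting loop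
lemma pvLoop_eq (p0 : List Int) : ∀ (f k : Nat),
    ((List.range (k+1)).map (fun j => pvVec (pvTraj p0 j))).Nodup →
    pvLoopA f (pvTraj p0 k).1 (pvTraj p0 k).2
        ((List.range (k+1)).map (fun j => pvVec (pvTraj p0 j)))
      = pvLoopB f (pvVec (pvTraj p0 0)) (pvTraj p0 k).1 (pvTraj p0 k).2 (k : Int) := by
  intro f
  induction f with
  | zero => intro k hnd; rfl
  | succ f ih =>
    intro k hnd
    have hlk := pvTraj_len p0 k
    have happ : pvApplyComponent (pvTraj p0 k).1 (pvTraj p0 k).2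
        = pvStep (pvTraj p0 k).1 (pvTraj p0 k).2 :=
      pvApply_eq _ _ (hlk.2.trans hlk.1.symm)
    have hstep : pvStep (pvTraj p0 k).1 (pvTraj p0 k).2 = pvTraj p0 (k+1) := rfl
    simp only [pvLoopA, pvLoopB, happ, hstep]
    have hvec : (pvTraj p0 (k+1)).1 ++ (pvTraj p0 (k+1)).2 = pvVec (pvTraj p0 (k+1)) := rfl
    rw [hvec]
    by_cases hv : pvVec (pvTraj p0 (k+1)) = pvVec (pvTraj p0 0)
    · have hmem : pvVec (pvTraj p0 (k+1)) ∈
          (List.range (k+1)).map (fun j => pvVec (pvTraj p0 j)) := by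
        rw [hv]; exact List.mem_map.mpr ⟨0, by simp, rfl⟩
      have hcont : PySem.Set.contains
          ((List.range (k+1)).map (fun j => pvVec (pvTraj p0 j)))
          (pvVec (pvTraj p0 (k+1))) = true := by
        simpa [PySem.Set.contains] using hmem
      have hbeq : (pvVec (pvTraj p0 (k+1)) == pvVec (pvTraj p0 0)) = true := beq_iff_eq.mpr hv
      rw [hcont, hbeq]
      simp
    · have hnm : pvVec (pvTraj p0 (k+1)) ∉
          (List.range (k+1)).map (fun j => pvVec (pvTraj p0 j)) := by
        intro hmem
        obtain ⟨j, hj, hje⟩ := List.mem_map.mp hmem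
        rw [List.mem_range] at hj
        cases j with
        | zero => exact hv hje.symm
        | succ m =>
          have hm : m < k := by omega
          have hlm := pvTraj_len p0 m
          have hje' : pvVec (pvStep (pvTraj p0 m).1 (pvTraj p0 m).2)
              = pvVec (pvStep (pvTraj p0 k).1 (pvTraj p0 k).2) := hje
          obtain ⟨e1, e2⟩ := pvStep_inj (pvTraj p0 m).1 (pvTraj p0 m).2
            (pvTraj p0 k).1 (pvTraj p0 k).2
            (hlm.2.trans hlm.1.symm) (hlk.2.trans hlk.1.symm)
            (hlm.1.trans hlk.1.symm) hje'
          have hdup : pvVec (pvTraj p0 m) = pvVec (pvTraj p0 k) := by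
            unfold pvVec; rw [e1, e2]
          have hm1 : m < ((List.range (k+1)).map (fun j => pvVec (pvTraj p0 j))).length := by
            simp; omega
          have hk1 : k < ((List.range (k+1)).map (fun j => pvVec (pvTraj p0 j))).length := by
            simp
          have : ((List.range (k+1)).map (fun j => pvVec (pvTraj p0 j)))[m]'hm1
              = ((List.range (k+1)).map (fun j => pvVec (pvTraj p0 j)))[k]'hk1 := by
            simp [List.getElem_map, List.getElem_range]
            exact hdup
          rw [hnd.getElem_inj_iff] at this
          omega
      have hcont : PySem.Set.contains
          ((List.range (k+1)).map (fun j => pvVec (pvTraj p0 j)))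
          (pvVec (pvTraj p0 (k+1))) = false := by
        simpa [PySem.Set.contains] using hnm
      have hbeq : (pvVec (pvTraj p0 (k+1)) == pvVec (pvTraj p0 0)) = false := by
        simpa using hv
      rw [hcont, hbeq]
      simp only [Bool.false_eq_true, if_false]
      have hadd : PySem.Set.add ((List.range (k+1)).map (fun j => pvVec (pvTraj p0 j)))
          (pvVec (pvTraj p0 (k+1)))
          = (List.range (k+2)).map (fun j => pvVec (pvTraj p0 j)) := by
        rw [PySem.Set.add, hcont]
        simp [List.range_succ]
      have hnd' : ((List.range (k+2)).map (fun j => pvVec (pvTraj p0 j))).Nodup := by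
        rw [show k+2 = (k+1)+1 from rfl, List.range_succ, List.map_append]
        simp [List.nodup_append, hnd]
        intro a ha hae
        exact hnm (List.mem_map.mpr ⟨a, List.mem_range.mpr (by omega), hae⟩)
      have := ih (k+1) hnd'
      rw [hadd]
      have hcast : ((k+1 : Nat) : Int) = (k : Int) + 1 := by push_cast; ring
      rw [← hcast]
      exact this

-- ===== VERDICT (by name: the statement is the Claim_ definition above) =====
theorem component_repeats_spec : Claim_equal_component_repeats := by
  intro positions _
  unfold Spec_component_repeats component_repeats component_repeats_alt
  have h := pvLoop_eq positions pvFuel 0 (by simp)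
  simpa [pvTraj, pvVec, PySem.Set.ofList, PySem.Set.add] using h
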